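-- pv_equiv track=rewrite | github.com/mark-sed/mossy-bench | benchmarks/numerica/eratosthenes/eratosthenes_sieve.py | prime_summary
-- ===== SOURCE A (Python) =====
-- def prime_summary(is_prime, bins=10):
--     """
--     Collect useful information without sorting:
--     - prime count
--     - top-K largest primes
--     - checksum
--     """
--     limit = len(is_prime) - 1
--     top = [0] * bins
--     count = 0
--
--     for i in range(2, limit + 1):
--         if is_prime[i]:
--             count += 1
--
--             # find smallest in top[]
--             min_i = 0
--             min_val = top[0]
--             for j in range(1, bins):
--                 if top[j] < min_val:
--                     min_val = top[j]
--                     min_i = j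
--
--             if i > min_val:
--                 top[min_i] = i
--
--     return count, top
-- ===== SOURCE B (Python) =====
-- def prime_summary(is_prime, bins=10):
--     # Primes appear in increasing order, so the minimum slot in top[] is always
--     # the oldest entry: insertion is round-robin at position count % bins.
--     count = 0
--     top = [0] * bins
--     for i in range(2, len(is_prime)):
--         if is_prime[i]:
--             top[count % bins] = i
--             count += 1
--     return count, top
-- ===== Notes on version B (the rewrite author's own statement) =====
-- stated objective: faster
-- what changed: B drops A's inner min-scan over the bins: since prime indices arrive in increasing order the minimum slot is always the oldest entry, so B inserts round-robin at position count % bins in a single pass.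
import Mathlib
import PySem

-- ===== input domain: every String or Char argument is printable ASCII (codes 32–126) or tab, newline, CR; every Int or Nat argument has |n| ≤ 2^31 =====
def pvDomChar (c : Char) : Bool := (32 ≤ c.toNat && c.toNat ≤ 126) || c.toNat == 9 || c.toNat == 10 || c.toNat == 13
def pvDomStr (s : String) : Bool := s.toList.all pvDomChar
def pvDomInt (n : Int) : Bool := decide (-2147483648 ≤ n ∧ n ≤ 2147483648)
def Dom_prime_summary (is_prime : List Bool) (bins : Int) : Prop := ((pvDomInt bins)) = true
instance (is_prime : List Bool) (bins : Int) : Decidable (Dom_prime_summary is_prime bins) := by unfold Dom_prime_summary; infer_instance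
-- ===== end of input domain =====

-- B replaces A's O(n*bins) min-scan by O(n) round-robin insertion at count % bins
-- (valid because primes arrive in increasing order, so the minimum slot is always the oldest entry).

-- ===== PORT A =====
-- inner loop of A: find (index, value) of the first minimum of top over j in range(1, bins)
def pvStepMin (top : List Int) : Int × Int → Int → Int × Int := fun mj j =>
  if PySem.List.pyGetD top j 0 < mj.2 then (j, PySem.List.pyGetD top j 0) else mj

-- outer loop body of A
def pvStepA (is_prime : List Bool) (bins : Int) : (List Int × Int) → Int → (List Int × Int) := fun st i =>
  if PySem.List.pyGetD is_prime i false then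
    let count := st.2 + 1
    let m := (PySem.List.pyRange 1 bins 1).foldl (pvStepMin st.1) (0, PySem.List.pyGetD st.1 0 0)
    if i > m.2 then (PySem.List.pySetD st.1 m.1 i, count) else (st.1, count)
  else st

def prime_summary (is_prime : List Bool) (bins : Int) : Int × List Int :=
  let limit : Int := (is_prime.length : Int) - 1
  let st := (PySem.List.pyRange 2 (limit + 1) 1).foldl (pvStepA is_prime bins)
              (List.replicate bins.toNat 0, 0)
  (st.2, st.1)

-- ===== PORT B =====
-- loop body of B: round-robin insertion at count % bins
def pvStepB (is_prime : List Bool) (bins : Int) : (Int × List Int) → Int → (Int × List Int) := fun st i =>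
  if PySem.List.pyGetD is_prime i false then
    (st.1 + 1, PySem.List.pySetD st.2 (PySem.Int.mod st.1 bins) i)
  else st

def prime_summary_alt (is_prime : List Bool) (bins : Int) : Int × List Int :=
  (PySem.List.pyRange 2 (is_prime.length : Int) 1).foldl (pvStepB is_prime bins)
    (0, List.replicate bins.toNat 0)

-- ===== PRECONDITION & SPEC =====
-- Pre_ excludes exactly the inputs on which the Python A raises (IndexError from top[0]):
-- bins ≤ 0 while some index ≥ 2 is marked prime.  (B raises there too.)
def Pre_prime_summary (is_prime : List Bool) (bins : Int) : Prop :=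
  1 ≤ bins ∨ (is_prime.drop 2).all (fun b => !b) = true
instance (is_prime : List Bool) (bins : Int) : Decidable (Pre_prime_summary is_prime bins) := by
  unfold Pre_prime_summary; infer_instance

def pvWitness_prime_summary : List Bool × Int := ([false, false, true, true, false, true], 2)

def Spec_prime_summary (is_prime : List Bool) (bins : Int) (out : Int × List Int) : Prop := out = prime_summary_alt is_prime bins
instance (is_prime : List Bool) (bins : Int) (out : Int × List Int) : Decidable (Spec_prime_summary is_prime bins out) := by unfold Spec_prime_summary; infer_instance

-- ===== CLAIM (what is proved, stated in full; the proofs are below) =====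
def Claim_equal_prime_summary : Prop := ∀ (is_prime : List Bool) (bins : Int), Dom_prime_summary is_prime bins → Pre_prime_summary is_prime bins → Spec_prime_summary is_prime bins (prime_summary is_prime bins)

-- ===== LEMMAS AND PROOFS =====

-- cyclic "age rank" of slot j when the oldest slot is r: 0 = oldest, n-1 = newest
def pvRnk (r n j : ℕ) : ℕ := (j + n - r) % n

-- invariant of the shared top[] array after `count` primes have been inserted
def pvInv (top : List Int) (count n : ℕ) : Prop :=
  top.length = n ∧
  (∀ j, 0 ≤ top.getD j 0) ∧
  (∀ j k, j < n → k < n → pvRnk (count % n) n j < pvRnk (count % n) n k →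
      top.getD j 0 ≤ top.getD k 0 ∧ (top.getD j 0 = top.getD k 0 → top.getD k 0 = 0)) ∧
  (∀ j, j < n → n - min count n ≤ pvRnk (count % n) n j → 2 ≤ top.getD j 0)

-- mod for arguments below 2n, without a constant divisor (omega cannot do variable %)
lemma pvMod2 (x n : ℕ) (_hn : 0 < n) (hx : x < 2 * n) : x % n = if x < n then x else x - n := by
  split
  · exact Nat.mod_eq_of_lt ‹_›
  · rw [Nat.mod_eq_sub_mod (by omega), Nat.mod_eq_of_lt (by omega)]

lemma pvRnk_self (r n : ℕ) (hr : r < n) : pvRnk r n r = 0 := by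
  unfold pvRnk
  have h : r + n - r = n := by omega
  rw [h, Nat.mod_self]

lemma pvRnk_lt (r n j : ℕ) (hn : 0 < n) : pvRnk r n j < n := by
  exact Nat.mod_lt _ hn

lemma pvRnk_pos (r n j : ℕ) (hr : r < n) (hj : j < n) (hne : j ≠ r) : 0 < pvRnk r n j := by
  unfold pvRnk
  rw [pvMod2 _ n (by omega) (by omega)]
  split <;> omega

lemma pvRnk_succ (r n j : ℕ) (hn : 0 < n) (hr : r < n) (hj : j < n) :
    pvRnk ((r + 1) % n) n j = if j = r then n - 1 else pvRnk r n j - 1 := by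
  unfold pvRnk
  by_cases hc : r + 1 < n
  · rw [Nat.mod_eq_of_lt hc]
    by_cases hjr : j = r
    · subst hjr
      have h : j + n - (j + 1) = n - 1 := by omega
      rw [h, Nat.mod_eq_of_lt (by omega), if_pos rfl]
    · rw [if_neg hjr, pvMod2 (j + n - (r + 1)) n hn (by omega),
          pvMod2 (j + n - r) n hn (by omega)]
      split_ifs <;> omega
  · have e1 : (r + 1) % n = 0 := by
      have h : r + 1 = n := by omega
      rw [h, Nat.mod_self]
    rw [e1]
    have e2 : (j + n - 0) % n = j := by
      rw [pvMod2 _ n hn (by omega)]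
      split <;> omega
    rw [e2]
    by_cases hjr : j = r
    · rw [if_pos hjr]; omega
    · rw [if_neg hjr, pvMod2 (j + n - r) n hn (by omega)]
      split <;> omega

lemma pvGetD_set (top : List Int) (r j : ℕ) (p : Int) (hr : r < top.length) :
    (top.set r p).getD j 0 = if j = r then p else top.getD j 0 := by
  by_cases h : j = r
  · subst h; simp [List.getD, hr]
  · simp [List.getD, h, Ne.symm h]

lemma pvInv_argmin (top : List Int) (count n : ℕ) (hn : 0 < n) (hInv : pvInv top count n) :
    (∀ j, j < count % n → top.getD (count % n) 0 < top.getD j 0) ∧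
    (∀ j, j < n → top.getD (count % n) 0 ≤ top.getD j 0) := by
  obtain ⟨hlen, hnn, hord, hnz⟩ := hInv
  set r := count % n with hrdef
  have hr : r < n := Nat.mod_lt _ hn
  have hord' : ∀ j, j < n → j ≠ r →
      top.getD r 0 ≤ top.getD j 0 ∧ (top.getD r 0 = top.getD j 0 → top.getD j 0 = 0) := by
    intro j hj hne
    exact hord r j hr hj (by rw [pvRnk_self r n hr]; exact pvRnk_pos r n j hr hj hne)
  constructor
  · intro j hj
    have hjn : j < n := by omega
    have hne : j ≠ r := by omega
    have h2j : 2 ≤ top.getD j 0 := by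
      apply hnz j hjn
      unfold pvRnk
      rw [pvMod2 _ n hn (by omega), if_pos (by omega)]
      rcases Nat.lt_or_ge count n with h | h
      · have hrc : r = count := by rw [hrdef, Nat.mod_eq_of_lt h]
        omega
      · omega
    rcases lt_or_eq_of_le (hord' j hjn hne).1 with h | h
    · exact h
    · exfalso; have := (hord' j hjn hne).2 h; omega
  · intro j hj
    by_cases hne : j = r
    · subst hne; exact le_refl _
    · exact (hord' j hj hne).1

lemma pvInv_set (top : List Int) (count n : ℕ) (p : Int) (hn : 0 < n)
    (hInv : pvInv top count n) (hp2 : 2 ≤ p) (hlt : ∀ j, top.getD j 0 < p) :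
    pvInv (top.set (count % n) p) (count + 1) n := by
  obtain ⟨hlen, hnn, hord, hnz⟩ := hInv
  set r := count % n with hrdef
  have hr : r < n := Nat.mod_lt _ hn
  have hrlen : r < top.length := by omega
  have hmod : (count + 1) % n = (r + 1) % n := by rw [hrdef, Nat.mod_add_mod]
  have hget : ∀ j, (top.set r p).getD j 0 = if j = r then p else top.getD j 0 :=
    fun j => pvGetD_set top r j p hrlen
  refine ⟨by simp [hlen], ?_, ?_, ?_⟩
  · intro j; rw [hget]; split
    · omega
    · exact hnn j
  · intro j k hj hk hlt'
    rw [hmod, pvRnk_succ r n j hn hr hj, pvRnk_succ r n k hn hr hk] at hlt'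
    rw [hget j, hget k]
    by_cases hjr : j = r
    · exfalso
      rw [if_pos hjr] at hlt'
      split at hlt' <;> [omega; skip]
      have := pvRnk_lt r n k hn; omega
    · rw [if_neg hjr] at hlt'
      by_cases hkr : k = r
      · rw [if_neg hjr, if_pos hkr]
        exact ⟨le_of_lt (hlt j), fun h => absurd h (ne_of_lt (hlt j))⟩
      · rw [if_neg hjr, if_neg hkr]
        rw [if_neg hkr] at hlt'
        have hpj := pvRnk_pos r n j hr hj hjr
        have hpk := pvRnk_pos r n k hr hk hkr
        exact hord j k hj hk (by omega)
  · intro j hj hcond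
    rw [hget]
    by_cases hjr : j = r
    · rw [if_pos hjr]; exact hp2
    · rw [if_neg hjr]
      rw [hmod, pvRnk_succ r n j hn hr hj, if_neg hjr] at hcond
      have hpj := pvRnk_pos r n j hr hj hjr
      apply hnz j hj
      omega

-- the inner scan of A computes the first argmin; under h1/h2 that is slot r
lemma pvScan (top : List Int) (n r : ℕ) (_hn : 0 < n) (hr : r < n)
    (h1 : ∀ j, j < r → top.getD r 0 < top.getD j 0)
    (h2 : ∀ j, j < n → top.getD r 0 ≤ top.getD j 0) :
    (PySem.List.pyRange 1 (n : Int) 1).foldl (pvStepMin top) (0, PySem.List.pyGetD top 0 0)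
      = ((r : Int), top.getD r 0) := by
  have hinit : (PySem.List.pyGetD top (0 : Int) 0) = top.getD 0 0 := by
    simpa using PySem.List.pyGetD_natCast top 0 0
  have hstep : ∀ (mj : Int × Int) (t : ℕ), pvStepMin top mj (t : Int)
      = if top.getD t 0 < mj.2 then ((t : Int), top.getD t 0) else mj := by
    intro mj t
    unfold pvStepMin
    rw [PySem.List.pyGetD_natCast]
  have S1 : ∀ t : ℕ, 1 ≤ t → t ≤ r → ∃ k : ℕ, k < t ∧
      (PySem.List.pyRange 1 (t : Int) 1).foldl (pvStepMin top) (0, PySem.List.pyGetD top 0 0)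
        = ((k : Int), top.getD k 0) := by
    intro t
    induction t with
    | zero => omega
    | succ t ih =>
      intro _ hle
      by_cases ht : t = 0
      · subst ht
        refine ⟨0, by omega, ?_⟩
        rw [show ((0+1 : ℕ) : Int) = 1 by norm_num,
            PySem.List.pyRange_one_eq_nil (by omega)]
        simp [hinit]
      · obtain ⟨k, hk, hfold⟩ := ih (by omega) (by omega)
        have hsplit : PySem.List.pyRange 1 ((t : ℕ) + 1 : Int) 1
            = PySem.List.pyRange 1 (t : Int) 1 ++ [(t : Int)] :=
          PySem.List.pyRange_one_succ_right (by exact_mod_cast Nat.one_le_iff_ne_zero.mpr ht)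
        rw [show (((t+1 : ℕ)) : Int) = ((t : ℕ) : Int) + 1 by push_cast; ring,
            hsplit, List.foldl_append, hfold]
        simp only [List.foldl_cons, List.foldl_nil, hstep]
        by_cases hv : top.getD t 0 < top.getD k 0
        · exact ⟨t, by omega, by rw [if_pos hv]⟩
        · exact ⟨k, by omega, by rw [if_neg hv]⟩
  have S2 : ∀ t : ℕ, r < t → t ≤ n →
      (PySem.List.pyRange 1 (t : Int) 1).foldl (pvStepMin top) (0, PySem.List.pyGetD top 0 0)
        = ((r : Int), top.getD r 0) := by
    intro t
    induction t with
    | zero => omega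
    | succ t ih =>
      intro hrt htn
      by_cases htr : t = r
      · subst htr
        by_cases ht0 : t = 0
        · subst ht0
          rw [show ((0+1 : ℕ) : Int) = 1 by norm_num,
              PySem.List.pyRange_one_eq_nil (by omega)]
          simp [hinit]
        · obtain ⟨k, hk, hfold⟩ := S1 t (by omega) (by omega)
          have hsplit : PySem.List.pyRange 1 ((t : ℕ) + 1 : Int) 1
              = PySem.List.pyRange 1 (t : Int) 1 ++ [(t : Int)] :=
            PySem.List.pyRange_one_succ_right (by exact_mod_cast Nat.one_le_iff_ne_zero.mpr ht0)
          rw [show (((t+1 : ℕ)) : Int) = ((t : ℕ) : Int) + 1 by push_cast; ring,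
              hsplit, List.foldl_append, hfold]
          simp only [List.foldl_cons, List.foldl_nil, hstep]
          rw [if_pos (h1 k hk)]
      · have hfold := ih (by omega) (by omega)
        have ht0 : t ≠ 0 := by omega
        have hsplit : PySem.List.pyRange 1 ((t : ℕ) + 1 : Int) 1
            = PySem.List.pyRange 1 (t : Int) 1 ++ [(t : Int)] :=
          PySem.List.pyRange_one_succ_right (by exact_mod_cast Nat.one_le_iff_ne_zero.mpr ht0)
        rw [show (((t+1 : ℕ)) : Int) = ((t : ℕ) : Int) + 1 by push_cast; ring,
            hsplit, List.foldl_append, hfold]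
        simp only [List.foldl_cons, List.foldl_nil, hstep]
        rw [if_neg (not_lt.mpr (h2 t (by omega)))]
  exact S2 n hr (le_refl n)

lemma pvFoldlFix {α β : Type} (f : α → β → α) (s : α) :
    ∀ L : List β, (∀ x ∈ L, f s x = s) → L.foldl f s = s := by
  intro L
  induction L with
  | nil => intro _; rfl
  | cons x xs ih =>
    intro h
    simp only [List.foldl_cons, h x (List.mem_cons_self)]
    exact ih (fun y hy => h y (List.mem_cons_of_mem x hy))

-- the main loop: A's fold and B's fold stay in lockstep (states are swaps of each other)
lemma pvLoop (ip : List Bool) (bins : Int) (hb : 1 ≤ bins) (b : Int) :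
    ∀ (t : ℕ) (a : Int), (b - a).toNat = t → 2 ≤ a →
    ∀ (top : List Int) (count : ℕ), pvInv top count bins.toNat →
    (∀ j, top.getD j 0 < a) →
    (PySem.List.pyRange a b 1).foldl (pvStepA ip bins) (top, (count : Int))
      = Prod.swap ((PySem.List.pyRange a b 1).foldl (pvStepB ip bins) ((count : Int), top)) := by
  intro t
  induction t with
  | zero =>
    intro a h0 _ top count _ _
    rw [PySem.List.pyRange_one_eq_nil (by omega)]
    rfl
  | succ t ih =>
    intro a ht ha top count hInv hBnd
    have hab : a < b := by omega
    rw [PySem.List.pyRange_one_cons hab]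
    simp only [List.foldl_cons]
    have hn0 : 0 < bins.toNat := by omega
    have hbn : (bins.toNat : Int) = bins := Int.toNat_of_nonneg (by omega)
    set n := bins.toNat with hn
    by_cases hg : PySem.List.pyGetD ip a false = true
    · set r := count % n with hrdef
      have hr : r < n := Nat.mod_lt _ hn0
      obtain ⟨h1, h2⟩ := pvInv_argmin top count n hn0 hInv
      have hscan : (PySem.List.pyRange 1 bins 1).foldl (pvStepMin top)
          (0, PySem.List.pyGetD top 0 0) = ((r : Int), top.getD r 0) := by
        rw [← hbn]; exact pvScan top n r hn0 hr h1 h2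
      have hA : pvStepA ip bins (top, (count : Int)) a = (top.set r a, (count : Int) + 1) := by
        unfold pvStepA
        rw [hg]
        simp only [if_true]
        rw [hscan]
        have hgt : a > top.getD r 0 := hBnd r
        rw [if_pos hgt]
        simp [PySem.List.pySetD_natCast]
      have hB : pvStepB ip bins ((count : Int), top) a = ((count : Int) + 1, top.set r a) := by
        unfold pvStepB
        rw [hg]
        simp only [if_true]
        rw [← hbn, PySem.Int.mod_natCast, PySem.List.pySetD_natCast]
      rw [hA, hB]
      have hc1 : ((count : Int) + 1) = ((count + 1 : ℕ) : Int) := by push_cast; ring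
      rw [hc1]
      have hInv' : pvInv (top.set r a) (count + 1) n :=
        pvInv_set top count n a hn0 hInv (by omega) hBnd
      have hlen : top.length = n := hInv.1
      have hBnd' : ∀ j, (top.set r a).getD j 0 < a + 1 := by
        intro j
        rw [pvGetD_set top r j a (by rw [hlen]; exact hr)]
        · split
          · omega
          · exact lt_trans (hBnd j) (by omega)
      exact ih (a + 1) (by omega) (by omega) (top.set r a) (count + 1) hInv' hBnd'
    · have hgf : PySem.List.pyGetD ip a false = false := by
        cases h : PySem.List.pyGetD ip a false
        · rfl
        · exact absurd h hg
      have hA : pvStepA ip bins (top, (count : Int)) a = (top, (count : Int)) := by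
        unfold pvStepA; rw [hgf]; simp
      have hB : pvStepB ip bins ((count : Int), top) a = ((count : Int), top) := by
        unfold pvStepB; rw [hgf]; simp
      rw [hA, hB]
      exact ih (a + 1) (by omega) (by omega) top count hInv
        (fun j => lt_trans (hBnd j) (by omega))

lemma pvInv_init (n : ℕ) (hn : 0 < n) : pvInv (List.replicate n 0) 0 n := by
  have hget : ∀ j, (List.replicate n (0 : Int)).getD j 0 = 0 := by
    intro j
    simp [List.getD, List.getElem?_replicate]
    split <;> rfl
  refine ⟨by simp, fun j => by rw [hget], ?_, ?_⟩
  · intro j k _ _ _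
    rw [hget j, hget k]
    exact ⟨le_refl _, fun _ => rfl⟩
  · intro j hj hcond
    exfalso
    have := pvRnk_lt (0 % n) n j hn
    omega

-- ===== VERDICT (by name: the statement is the Claim_ definition above) =====
theorem prime_summary_spec : Claim_equal_prime_summary := by
  unfold Claim_equal_prime_summary
  intro ip bins _ hpre
  unfold Spec_prime_summary prime_summary prime_summary_alt
  have hrange : ((ip.length : Int) - 1 + 1) = (ip.length : Int) := by ring
  simp only [hrange]
  by_cases hb : 1 ≤ bins
  · have hInv0 := pvInv_init bins.toNat (by omega)
    have hloop := pvLoop ip bins hb (ip.length) ((((ip.length : Int)) - 2).toNat) 2 rfl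
      (le_refl 2) (List.replicate bins.toNat 0) 0 hInv0
      (by intro j
          have : (List.replicate bins.toNat (0 : Int)).getD j 0 = 0 := by
            simp [List.getD, List.getElem?_replicate]; split <;> rfl
          omega)
    rw [show ((0 : ℕ) : Int) = 0 from rfl] at hloop
    rw [hloop]
    rfl
  · have hall : (ip.drop 2).all (fun b => !b) = true := by
      rcases hpre with h | h
      · exact absurd h hb
      · exact h
    have hfix : ∀ i ∈ PySem.List.pyRange 2 (ip.length : Int) 1,
        PySem.List.pyGetD ip i false = false := by
      intro i hi
      rw [PySem.List.mem_pyRange_one] at hi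
      rw [PySem.List.pyGetD_eq_getElem ip false (by omega) hi.2]
      have hk2 : 2 ≤ i.toNat := by omega
      have hkl : i.toNat < ip.length := by omega
      have hmem : ip[i.toNat] ∈ ip.drop 2 := by
        have : (ip.drop 2)[i.toNat - 2]'(by simp; omega) = ip[i.toNat] := by
          rw [List.getElem_drop]
          congr 1
          omega
        rw [← this]
        exact List.getElem_mem _
      have := List.all_eq_true.mp hall _ hmem
      simpa using this
    rw [pvFoldlFix _ _ _ (by
      intro x hx
      unfold pvStepA
      rw [hfix x hx]
      simp)]
    rw [pvFoldlFix _ _ _ (by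
      intro x hx
      unfold pvStepB
      rw [hfix x hx]
      simp)]
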